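-- pv_equiv track=rewrite | github.com/skyoxu/lastking | scripts/python/evaluate_obligations_freeze_whitelist.py | build_whitelist_bucket_map
-- ===== SOURCE A (Python) =====
-- from typing import Dict, Iterable, List
--
-- def build_whitelist_bucket_map(task_sets: dict) -> Dict[int, str]:
--     bucket_map: Dict[int, str] = {}
--     for bucket in ("stable_ok", "jitter_ok_majority", "jitter_fail_majority", "stable_fail"):
--         for task_id in task_sets.get(bucket, []):
--             task_id_int = int(task_id)
--             if task_id_int in bucket_map:
--                 bucket_map[task_id_int] = "conflict"
--             else:
--                 bucket_map[task_id_int] = bucket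
--     return bucket_map
-- ===== SOURCE B (Python) =====
-- def build_whitelist_bucket_map(task_sets: dict):
--     buckets = ("stable_ok", "jitter_ok_majority", "jitter_fail_majority", "stable_fail")
--     pairs = [(int(t), b) for b in buckets for t in task_sets.get(b, [])]
--     counts = {}
--     for i, _ in pairs:
--         counts[i] = counts.get(i, 0) + 1
--     result = {}
--     for i, b in pairs:
--         result[i] = b if counts[i] == 1 else "conflict"
--     return result
-- ===== Notes on version B (the rewrite author's own statement) =====
-- stated objective: alternative
-- what changed: B first flattens the four buckets into an (id, bucket) pair list, counts id occurrences once, and then assigns each id its bucket or 'conflict' from the total count, instead of A's incremental membership-check-and-overwrite while building the dict.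
import Mathlib
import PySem

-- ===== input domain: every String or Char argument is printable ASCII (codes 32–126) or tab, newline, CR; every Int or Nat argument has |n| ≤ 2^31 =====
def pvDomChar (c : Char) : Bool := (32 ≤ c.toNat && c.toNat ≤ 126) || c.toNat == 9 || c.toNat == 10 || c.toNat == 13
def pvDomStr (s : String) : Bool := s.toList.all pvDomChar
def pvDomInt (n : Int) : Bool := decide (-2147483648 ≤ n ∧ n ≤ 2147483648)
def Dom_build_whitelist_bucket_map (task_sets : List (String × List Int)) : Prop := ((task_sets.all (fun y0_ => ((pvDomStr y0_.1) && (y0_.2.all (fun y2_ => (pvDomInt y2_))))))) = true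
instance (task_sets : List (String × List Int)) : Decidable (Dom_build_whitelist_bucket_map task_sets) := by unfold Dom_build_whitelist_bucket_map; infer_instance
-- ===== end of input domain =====

-- B replaces A's incremental membership-check-and-overwrite with a flatten / count-once /
-- assign-from-total-counts pipeline (objective: alternative decomposition, same cost).

-- ===== PORT A =====
-- the fixed bucket tuple of A's outer for loop
def pvBuckets : List String :=
  ["stable_ok", "jitter_ok_majority", "jitter_fail_majority", "stable_fail"]

def build_whitelist_bucket_map (task_sets : List (String × List Int)) : List (Int × String) :=
  (pvBuckets.foldl (fun bucket_map bucket =>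
      ((PySem.Dict.mk task_sets).getD bucket []).foldl (fun bucket_map task_id =>
        if bucket_map.contains task_id then
          bucket_map.insert task_id "conflict"
        else
          bucket_map.insert task_id bucket) bucket_map)
    PySem.Dict.empty).items

-- ===== PORT B =====
def build_whitelist_bucket_map_alt (task_sets : List (String × List Int)) : List (Int × String) :=
  let pairs : List (Int × String) :=
    pvBuckets.flatMap (fun b => ((PySem.Dict.mk task_sets).getD b []).map (fun t => (t, b)))
  let counts : PySem.Dict Int Int :=
    pairs.foldl (fun d p => d.insert p.1 (d.getD p.1 0 + 1)) PySem.Dict.empty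
  (pairs.foldl (fun d p =>
      d.insert p.1 (if counts.getD p.1 0 == 1 then p.2 else "conflict")) PySem.Dict.empty).items

-- ===== PRECONDITION & SPEC =====
def Spec_build_whitelist_bucket_map (task_sets : List (String × List Int)) (out : List (Int × String)) : Prop := out = build_whitelist_bucket_map_alt task_sets
instance (task_sets : List (String × List Int)) (out : List (Int × String)) : Decidable (Spec_build_whitelist_bucket_map task_sets out) := by unfold Spec_build_whitelist_bucket_map; infer_instance

-- ===== CLAIM (what is proved, stated in full; the proofs are below) =====
def Claim_equal_build_whitelist_bucket_map : Prop := ∀ (task_sets : List (String × List Int)), Dom_build_whitelist_bucket_map task_sets → Spec_build_whitelist_bucket_map task_sets (build_whitelist_bucket_map task_sets)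

-- ===== LEMMAS AND PROOFS =====

-- A's loop body, as a function of the (id, bucket) pair
def pvStepA (d : PySem.Dict Int String) (p : Int × String) : PySem.Dict Int String :=
  if d.contains p.1 then d.insert p.1 "conflict" else d.insert p.1 p.2

-- occurrences of id k in the pair list
def pvCnt (ps : List (Int × String)) (k : Int) : Nat := ps.countP (fun p => p.1 == k)

lemma pvCnt_zero_iff (ps : List (Int × String)) (k : Int) :
    pvCnt ps k = 0 ↔ ps.find? (fun p => p.1 == k) = none := by
  simp [pvCnt, List.countP_eq_zero, List.find?_eq_none]

lemma pvCnt_reverse (ps : List (Int × String)) (k : Int) :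
    pvCnt ps.reverse k = pvCnt ps k := by
  simp [pvCnt]

lemma pvStepA_contains_self (d : PySem.Dict Int String) (p : Int × String) :
    (pvStepA d p).contains p.1 = true := by
  unfold pvStepA
  by_cases hd : d.contains p.1 <;> simp [hd, PySem.Dict.contains_insert_self]

-- A's nested loop over the buckets is the single loop over the flattened pair list
lemma pvA_flat (task_sets : List (String × List Int)) :
    (pvBuckets.foldl (fun bucket_map bucket =>
      ((PySem.Dict.mk task_sets).getD bucket []).foldl (fun bucket_map task_id =>
        if bucket_map.contains task_id then
          bucket_map.insert task_id "conflict"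
        else
          bucket_map.insert task_id bucket) bucket_map)
      PySem.Dict.empty) =
    (pvBuckets.flatMap (fun b =>
      ((PySem.Dict.mk task_sets).getD b []).map (fun t => (t, b)))).foldl pvStepA
      PySem.Dict.empty := by
  simp only [pvBuckets, List.flatMap, List.map, List.foldl, List.flatten]
  simp [List.foldl_append, List.foldl_map, pvStepA]

-- get? after A's loop: first pair wins the bucket, any repeat forces "conflict"
lemma pvA_get (ps : List (Int × String)) (d : PySem.Dict Int String) (k : Int) :
    (ps.foldl pvStepA d).get? k =
      match ps.find? (fun p => p.1 == k) with
      | none => d.get? k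
      | some p => some (if d.contains k ∨ 2 ≤ pvCnt ps k then "conflict" else p.2) := by
  induction ps generalizing d with
  | nil => rfl
  | cons p rest ih =>
    rw [List.foldl_cons, ih]
    by_cases hk : p.1 = k
    · subst hk
      have hbe : (p.1 == p.1) = true := by simp
      rcases hfind : rest.find? (fun q => q.1 == p.1) with _ | q
      · have hc : pvCnt rest p.1 = 0 := (pvCnt_zero_iff rest p.1).mpr hfind
        have hcnt : pvCnt (p :: rest) p.1 = 1 := by
          unfold pvCnt at hc ⊢; rw [List.countP_cons]; simp [hc]
        simp only [hfind, List.find?_cons, hbe, hcnt]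
        unfold pvStepA
        by_cases hd : d.contains p.1 <;>
          simp [hd, PySem.Dict.get?_insert_self]
      · have hc : pvCnt rest p.1 ≠ 0 := by
          intro h0; rw [pvCnt_zero_iff] at h0; rw [h0] at hfind; cases hfind
        have hcnt : 2 ≤ pvCnt (p :: rest) p.1 := by
          unfold pvCnt at hc ⊢; rw [List.countP_cons]; simp only [hbe, if_true]; omega
        simp only [hfind, List.find?_cons, hbe]
        rw [if_pos (Or.inr hcnt), if_pos (Or.inl (pvStepA_contains_self d p))]
    · have hk' : ¬ k = p.1 := fun h => hk h.symm
      have hbe : (p.1 == k) = false := by simp [hk]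
      have hcnt : pvCnt (p :: rest) k = pvCnt rest k := by
        unfold pvCnt; rw [List.countP_cons]; simp [hbe]
      have hget : (pvStepA d p).get? k = d.get? k := by
        unfold pvStepA
        by_cases hd : d.contains p.1 <;> simp [hd, PySem.Dict.get?_insert, hk']
      have hcon : (pvStepA d p).contains k = d.contains k := by
        rw [PySem.Dict.contains_eq_isSome_get?, hget, ← PySem.Dict.contains_eq_isSome_get?]
      simp only [List.find?_cons, hbe, hcnt]
      rcases hfind : rest.find? (fun q => q.1 == k) with _ | q <;>
        simp only [hfind, hget, hcon]

-- get? after B's assignment loop: the last pair with key k wins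
lemma pvB_get (g : Int × String → String) (ps : List (Int × String))
    (d : PySem.Dict Int String) (k : Int) :
    (ps.foldl (fun d p => d.insert p.1 (g p)) d).get? k =
      match ps.reverse.find? (fun p => p.1 == k) with
      | none => d.get? k
      | some p => some (g p) := by
  induction ps generalizing d with
  | nil => rfl
  | cons p rest ih =>
    rw [List.foldl_cons, ih, List.reverse_cons, List.find?_append]
    rcases hfind : rest.reverse.find? (fun q => q.1 == k) with _ | q
    · simp only [hfind, Option.none_or]
      by_cases hk : p.1 = k
      · subst hk
        simp [PySem.Dict.get?_insert_self]
      · have hk' : ¬ k = p.1 := fun h => hk h.symm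
        simp [(by simp [hk] : (p.1 == k) = false),
          PySem.Dict.get?_insert, hk']
    · simp only [hfind, Option.some_or]

-- a key occurring exactly once: first and last occurrence coincide
lemma pvFind_unique (ps : List (Int × String)) (k : Int) (h : pvCnt ps k = 1) :
    ps.reverse.find? (fun p => p.1 == k) = ps.find? (fun p => p.1 == k) := by
  induction ps with
  | nil => rfl
  | cons p rest ih =>
    rw [List.reverse_cons, List.find?_append]
    by_cases hk : p.1 = k
    · have hbe : (p.1 == k) = true := by simp [hk]
      have hc : pvCnt rest k = 0 := by
        unfold pvCnt at h ⊢; rw [List.countP_cons] at h; simp only [hbe, if_true] at h; omega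
      have hcrev : rest.reverse.find? (fun q => q.1 == k) = none := by
        rw [← pvCnt_zero_iff, pvCnt_reverse]; exact hc
      simp [hcrev, hbe]
    · have hbe : (p.1 == k) = false := by simp [hk]
      have h' : pvCnt rest k = 1 := by
        unfold pvCnt at h ⊢; rw [List.countP_cons] at h
        simp only [hbe, if_false, Bool.false_eq_true, add_zero] at h; exact h
      rcases hf : rest.find? (fun q => q.1 == k) with _ | q
      · exact absurd ((pvCnt_zero_iff rest k).mpr hf) (by omega)
      · rw [ih h']
        have hstep : List.find? (fun p => p.1 == k) (p :: rest) =
            List.find? (fun p => p.1 == k) rest := by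
          simp [hbe]
        rw [hstep, hf]
        simp

-- B's counting loop computes pvCnt
lemma pvCounts_getD (ps : List (Int × String)) (k : Int) :
    (ps.foldl (fun (d : PySem.Dict Int Int) p => d.insert p.1 (d.getD p.1 0 + 1))
      PySem.Dict.empty).getD k 0 = (pvCnt ps k : Int) := by
  have h1 : ps.foldl (fun (d : PySem.Dict Int Int) p => d.insert p.1 (d.getD p.1 0 + 1))
      PySem.Dict.empty =
      (ps.map Prod.fst).foldl (fun (d : PySem.Dict Int Int) x => d.insert x (d.getD x 0 + 1))
        PySem.Dict.empty :=
    (List.foldl_map (f := Prod.fst)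
      (g := fun (d : PySem.Dict Int Int) x => d.insert x (d.getD x 0 + 1))
      (l := ps) (init := PySem.Dict.empty)).symm
  rw [h1, PySem.Dict.getD_foldl_insert_add_one]
  simp only [PySem.Dict.getD_empty, zero_add]
  norm_cast
  simp [pvCnt, List.count_eq_countP, List.countP_map, Function.comp_def]

-- the two result dicts agree on every lookup
lemma pvGet_eq (ps : List (Int × String)) (k : Int) :
    (ps.foldl pvStepA PySem.Dict.empty).get? k =
      (ps.foldl (fun d p =>
        d.insert p.1
          (if ((ps.foldl (fun (d : PySem.Dict Int Int) p => d.insert p.1 (d.getD p.1 0 + 1))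
              PySem.Dict.empty).getD p.1 0 == 1)
            then p.2 else "conflict")) PySem.Dict.empty).get? k := by
  rw [pvA_get, pvB_get]
  rcases hfirst : ps.find? (fun p => p.1 == k) with _ | p
  · have hlast : ps.reverse.find? (fun p => p.1 == k) = none := by
      rw [← pvCnt_zero_iff, pvCnt_reverse]
      exact (pvCnt_zero_iff ps k).mpr hfirst
    simp only [hfirst, hlast]
  · have hk : p.1 = k := by
      have := List.find?_some hfirst; simpa using this
    have hpos : pvCnt ps k ≠ 0 := by
      intro h0; rw [pvCnt_zero_iff] at h0; rw [h0] at hfirst; cases hfirst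
    by_cases hone : pvCnt ps k = 1
    · have hlast : ps.reverse.find? (fun q => q.1 == k) = some p := by
        rw [pvFind_unique ps k hone, hfirst]
      simp only [hfirst, hlast, hk]
      rw [pvCounts_getD, hone]
      simp [PySem.Dict.contains_empty]
    · have h2 : 2 ≤ pvCnt ps k := by omega
      have hlne : ps.reverse.find? (fun q => q.1 == k) ≠ none := by
        intro h0
        rw [← pvCnt_zero_iff, pvCnt_reverse] at h0
        omega
      rcases hlast : ps.reverse.find? (fun q => q.1 == k) with _ | q
      · exact absurd hlast hlne
      · have hqk : q.1 = k := by
          have := List.find?_some hlast; simpa using this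
        simp only [hfirst, hlast, hqk]
        rw [pvCounts_getD]
        have hbe : ((pvCnt ps k : Int) == 1) = false := by simp; omega
        simp [hbe, h2]

-- A's step written in insert-key form, for the generic key lemmas
lemma pvStepA_eq (ps : List (Int × String)) :
    ps.foldl pvStepA PySem.Dict.empty =
      ps.foldl (fun d p => d.insert p.1
        (if d.contains p.1 then "conflict" else p.2)) PySem.Dict.empty := by
  apply PySem.List.foldl_congr_mem
  intro d p _
  unfold pvStepA
  by_cases h : d.contains p.1 <;> simp [h]

lemma pvNodupA (ps : List (Int × String)) : (ps.foldl pvStepA PySem.Dict.empty).keys.Nodup := by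
  rw [pvStepA_eq]
  exact PySem.Dict.nodup_keys_foldl_insert_key ps Prod.fst _ PySem.Dict.empty
    (by simp [PySem.Dict.keys_empty])

lemma pvKeysA (ps : List (Int × String)) :
    (ps.foldl pvStepA PySem.Dict.empty).keys = PySem.Set.update [] (ps.map Prod.fst) := by
  rw [pvStepA_eq, PySem.Dict.keys_foldl_insert_key]
  simp [PySem.Dict.keys_empty]

-- the items of a dict are determined by its keys and its lookups
lemma pvItems_eq (d d' : PySem.Dict Int String)
    (hnd : d.keys.Nodup) (hnd' : d'.keys.Nodup)
    (hkeys : d.keys = d'.keys) (hget : ∀ k, d.get? k = d'.get? k) : d.items = d'.items := by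
  rw [PySem.Dict.items_eq_map_keys d hnd "", PySem.Dict.items_eq_map_keys d' hnd' "", hkeys]
  apply List.map_congr_left
  intro k _
  rw [PySem.Dict.getD_eq_get?_getD, PySem.Dict.getD_eq_get?_getD, hget]

-- ===== VERDICT (by name: the statement is the Claim_ definition above) =====
theorem build_whitelist_bucket_map_spec : Claim_equal_build_whitelist_bucket_map := by
  intro task_sets _
  unfold Spec_build_whitelist_bucket_map
  unfold build_whitelist_bucket_map build_whitelist_bucket_map_alt
  dsimp only
  rw [pvA_flat]
  set ps := pvBuckets.flatMap
    (fun b => ((PySem.Dict.mk task_sets).getD b []).map (fun t => (t, b))) with hps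
  apply pvItems_eq
  · exact pvNodupA ps
  · exact PySem.Dict.nodup_keys_foldl_insert_key ps Prod.fst _ PySem.Dict.empty
      (by simp [PySem.Dict.keys_empty])
  · rw [pvKeysA, PySem.Dict.keys_foldl_insert_key]
    simp [PySem.Dict.keys_empty]
  · intro k
    exact pvGet_eq ps k
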